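-- pv_equiv track=rewrite | github.com/thefairyphenomenon/Stockio---a-moron | .history/engine_20260314150031.py | convert_ticker
-- ===== SOURCE A (Python) =====
-- def convert_ticker(ticker):
--     ticker = ticker.strip().upper()
--     special = {"INDEXNSE:NIFTY_50": "^NSEI", "INDEXBOM:SENSEX": "^BSESN"}
--     if ticker in special:
--         return special[ticker]
--     prefixes = {"NASDAQ:": "", "NYSE:": "", "NYSEARCA:": "", "OTCMKTS:": "",
--                 "NSE:": ".NS", "BSE:": ".BO"}
--     for prefix, suffix in prefixes.items():
--         if ticker.startswith(prefix):
--             return ticker[len(prefix):] + suffix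
--     return ticker
-- ===== SOURCE B (Python) =====
-- def convert_ticker(ticker):
--     ticker = ticker.strip().upper()
--     special = {"INDEXNSE:NIFTY_50": "^NSEI", "INDEXBOM:SENSEX": "^BSESN"}
--     if ticker in special:
--         return special[ticker]
--     suffixes = {"NASDAQ:": "", "NYSE:": "", "NYSEARCA:": "", "OTCMKTS:": "",
--                 "NSE:": ".NS", "BSE:": ".BO"}
--     i = ticker.find(":")
--     if i == -1:
--         return ticker
--     suffix = suffixes.get(ticker[:i + 1])
--     if suffix is None:
--         return ticker
--     return ticker[i + 1:] + suffix
-- ===== Notes on version B (the rewrite author's own statement) =====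
-- stated objective: simpler
-- what changed: Replaces A's startswith-scan over the six prefixes by locating the first colon once with str.find and then doing a single dict lookup of the exchange token; tickers without a colon return immediately.
import Mathlib
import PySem

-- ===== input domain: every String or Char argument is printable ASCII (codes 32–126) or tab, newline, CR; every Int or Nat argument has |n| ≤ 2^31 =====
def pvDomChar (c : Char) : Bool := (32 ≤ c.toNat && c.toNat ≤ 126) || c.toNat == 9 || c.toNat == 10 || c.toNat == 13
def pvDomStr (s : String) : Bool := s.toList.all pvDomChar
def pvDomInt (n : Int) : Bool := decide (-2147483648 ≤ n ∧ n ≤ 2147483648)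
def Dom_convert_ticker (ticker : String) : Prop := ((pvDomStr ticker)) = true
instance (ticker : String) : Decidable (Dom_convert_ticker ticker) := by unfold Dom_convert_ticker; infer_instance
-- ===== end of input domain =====

-- B replaces A's startswith-scan over the six exchange prefixes by a single find(':')
-- plus one dict lookup of the exchange token (objective: simpler parse-then-lookup).

-- ===== PORT A =====
-- A's 'for prefix, suffix in prefixes.items(): if ticker.startswith(prefix): return …'
def convertTickerLoopA (t : String) : List (String × String) → String
  | [] => t
  | (p, suf) :: rest =>
      if PySem.Str.startswith t p then
        PySem.Str.slice t (some (PySem.Str.len p)) none ++ suf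
      else convertTickerLoopA t rest

def convert_ticker (ticker : String) : String :=
  let t := PySem.Str.upper (PySem.Str.strip ticker)
  let special : PySem.Dict String String :=
    PySem.Dict.ofList [("INDEXNSE:NIFTY_50", "^NSEI"), ("INDEXBOM:SENSEX", "^BSESN")]
  match special.get? t with
  | some v => v
  | none =>
      let prefixes : PySem.Dict String String :=
        PySem.Dict.ofList [("NASDAQ:", ""), ("NYSE:", ""), ("NYSEARCA:", ""), ("OTCMKTS:", ""),
                           ("NSE:", ".NS"), ("BSE:", ".BO")]
      convertTickerLoopA t prefixes.items

-- ===== PORT B =====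
def convert_ticker_alt (ticker : String) : String :=
  let t := PySem.Str.upper (PySem.Str.strip ticker)
  let special : PySem.Dict String String :=
    PySem.Dict.ofList [("INDEXNSE:NIFTY_50", "^NSEI"), ("INDEXBOM:SENSEX", "^BSESN")]
  match special.get? t with
  | some v => v
  | none =>
      let suffixes : PySem.Dict String String :=
        PySem.Dict.ofList [("NASDAQ:", ""), ("NYSE:", ""), ("NYSEARCA:", ""), ("OTCMKTS:", ""),
                           ("NSE:", ".NS"), ("BSE:", ".BO")]
      let i := PySem.Str.find t ":"
      if i == -1 then t
      else
        match suffixes.get? (PySem.Str.slice t none (some (i + 1))) with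
        | some suf => PySem.Str.slice t (some (i + 1)) none ++ suf
        | none => t

-- ===== PRECONDITION & SPEC =====
def Spec_convert_ticker (ticker : String) (out : String) : Prop := out = convert_ticker_alt ticker
instance (ticker : String) (out : String) : Decidable (Spec_convert_ticker ticker out) := by unfold Spec_convert_ticker; infer_instance

-- ===== CLAIM (what is proved, stated in full; the proofs are below) =====
def Claim_equal_convert_ticker : Prop := ∀ (ticker : String), Dom_convert_ticker ticker → Spec_convert_ticker ticker (convert_ticker ticker)

-- ===== LEMMAS AND PROOFS =====

lemma singleton_prefix_iff (c : Char) (m : List Char) : [c] <+: m ↔ ∃ r, m = c :: r := by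
  cases m <;> simp [List.cons_prefix_cons, eq_comm]

lemma singleton_infix_of_mem (c : Char) (l : List Char) (h : c ∈ l) : [c] <:+: l := by
  obtain ⟨p, q, rfl⟩ := List.append_of_mem h
  exact ⟨p, q, by simp⟩

-- the first ':' of q ++ ':' :: r, with ':' ∉ q, sits at index q.length
lemma find_colon_eq (l q r : List Char) (hq : (':' : Char) ∉ q) (hl : l = q ++ ':' :: r) :
    PySem.Chars.find l [':'] = (q.length : Int) := by
  have hinf : [(':' : Char)] <:+: l := ⟨q, r, by simp [hl]⟩
  have h0 : 0 ≤ PySem.Chars.find l [':'] := (PySem.Chars.find_nonneg_iff l [':']).mpr hinf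
  obtain ⟨h1, h2⟩ := PySem.Chars.find_spec h0
  have hdq : l.drop q.length = ':' :: r := by simp [hl]
  have hle : (PySem.Chars.find l [':']).toNat ≤ q.length := by
    by_contra hgt
    exact h2 q.length (by omega) (by rw [hdq]; exact ⟨r, rfl⟩)
  have hge : ¬ (PySem.Chars.find l [':']).toNat < q.length := by
    intro hlt
    obtain ⟨r', hr'⟩ := (singleton_prefix_iff ':' _).mp h1
    have hdrop : ∀ n, n ≤ q.length → l.drop n = q.drop n ++ (':' :: r) := by
      intro n hn; rw [hl]; exact List.drop_append_of_le_length hn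
    rw [hdrop _ (le_of_lt hlt)] at hr'
    have hqd : q.drop (PySem.Chars.find l [':']).toNat ≠ [] := by
      simp [List.drop_eq_nil_iff]; omega
    obtain ⟨x, xs, hx⟩ := List.exists_cons_of_ne_nil hqd
    have hxq : x ∈ q := List.mem_of_mem_drop (hx ▸ List.mem_cons_self)
    rw [hx, List.cons_append] at hr'
    have hx' : x = ':' := by simpa using congrArg List.head? hr'
    exact hq (hx' ▸ hxq)
  omega

-- A's loop returns t unchanged when t contains no ':' and every key contains one
lemma loopA_no_colon (t : String) (h : PySem.Chars.find t.toList [':'] = -1)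
    (ps : List (String × String)) (hps : ∀ pr ∈ ps, (':' : Char) ∈ pr.1.toList) :
    convertTickerLoopA t ps = t := by
  induction ps with
  | nil => rfl
  | cons pr rest ih =>
    obtain ⟨p, suf⟩ := pr
    have hmem : (':' : Char) ∈ p.toList := hps (p, suf) List.mem_cons_self
    have hsw : PySem.Str.startswith t p = false := by
      by_contra hT
      have hsw' : PySem.Str.startswith t p = true := by
        cases hB : PySem.Str.startswith t p <;> simp_all
      have hpre : p.toList <+: t.toList := by
        rw [PySem.Str.startswith_eq] at hsw'
        exact (PySem.Chars.startswith_iff _ _).mp hsw'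
      have : [(':' : Char)] <:+: t.toList :=
        (singleton_infix_of_mem ':' _ hmem).trans hpre.isInfix
      exact ((PySem.Chars.find_eq_neg_one_iff _ _).mp h) this
    simp only [convertTickerLoopA, hsw, Bool.false_eq_true, if_false]
    exact ih (fun pr hpr => hps pr (List.mem_cons_of_mem _ hpr))

-- when t has a ':' at index i, A's prefix loop equals B's lookup of t[:i+1]
lemma loopA_eq_lookup (t : String) (i : Int)
    (hi : PySem.Chars.find t.toList [':'] = i) (h0 : 0 ≤ i)
    (ps : List (String × String))
    (hps : ∀ pr ∈ ps, ∃ q, pr.1.toList = q ++ [':'] ∧ (':' : Char) ∉ q) :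
    convertTickerLoopA t ps =
      ((PySem.Dict.mk ps).get? (PySem.Str.slice t none (some (i + 1)))).elim t
        (fun suf => PySem.Str.slice t (some (i + 1)) none ++ suf) := by
  induction ps with
  | nil => rfl
  | cons pr rest ih =>
    obtain ⟨p, suf⟩ := pr
    obtain ⟨q, hpq, hq⟩ := hps (p, suf) List.mem_cons_self
    have hKlist : (PySem.Str.slice t none (some (i + 1))).toList = t.toList.take (i + 1).toNat := by
      rw [PySem.Str.toList_slice]
      exact PySem.List.slice_to _ (by omega)
    by_cases hsw : PySem.Str.startswith t p = true
    · -- the prefix matches: the first ':' is at q.length, so t[:i+1] = p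
      have hpre : p.toList <+: t.toList := by
        rw [PySem.Str.startswith_eq] at hsw
        exact (PySem.Chars.startswith_iff _ _).mp hsw
      obtain ⟨r, hr⟩ := hpre
      have hl : t.toList = q ++ ':' :: r := by rw [← hr, hpq]; simp
      have hiq : i = (q.length : Int) := by rw [← hi]; exact find_colon_eq _ q r hq hl
      have hK : PySem.Str.slice t none (some (i + 1)) = p := by
        rw [← String.toList_inj, hKlist, hpq, hl]
        have : (i + 1).toNat = q.length + 1 := by omega
        rw [this]
        simp [List.take_append]
      have hlen : PySem.Str.len p = i + 1 := by
        rw [PySem.Str.len_eq, hpq]; simp; omega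
      simp only [convertTickerLoopA, hsw, if_true, PySem.Dict.get?_mk_cons, hK,
        beq_self_eq_true, Option.elim]
      rw [hlen]
    · -- no match: t[:i+1] ≠ p, fall through to the rest of the dict
      have hKne : (p == PySem.Str.slice t none (some (i + 1))) = false := by
        apply beq_eq_false_iff_ne.mpr
        intro hKp
        apply hsw
        rw [PySem.Str.startswith_eq]
        apply (PySem.Chars.startswith_iff _ _).mpr
        rw [hKp, hKlist]
        exact List.take_prefix _ _
      simp only [convertTickerLoopA, hsw, Bool.false_eq_true, if_false, PySem.Dict.get?_mk_cons, hKne]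
      exact ih (fun pr hpr => hps pr (List.mem_cons_of_mem _ hpr))

-- ===== VERDICT (by name: the statement is the Claim_ definition above) =====
theorem convert_ticker_spec : Claim_equal_convert_ticker := by
  intro ticker _
  unfold Spec_convert_ticker
  simp only [convert_ticker, convert_ticker_alt]
  set t := PySem.Str.upper (PySem.Str.strip ticker) with ht
  cases hE : (PySem.Dict.ofList [("INDEXNSE:NIFTY_50", "^NSEI"), ("INDEXBOM:SENSEX", "^BSESN")] : PySem.Dict String String).get? t with
  | some v => rfl
  | none =>
    simp only []
    have hfind : PySem.Str.find t ":" = PySem.Chars.find t.toList [':'] := by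
      rw [PySem.Str.find_eq]; rfl
    have hdict : (PySem.Dict.ofList [("NASDAQ:", ""), ("NYSE:", ""), ("NYSEARCA:", ""), ("OTCMKTS:", ""), ("NSE:", ".NS"), ("BSE:", ".BO")] : PySem.Dict String String)
        = PySem.Dict.mk [("NASDAQ:", ""), ("NYSE:", ""), ("NYSEARCA:", ""), ("OTCMKTS:", ""), ("NSE:", ".NS"), ("BSE:", ".BO")] := by decide
    have hitems : (PySem.Dict.ofList [("NASDAQ:", ""), ("NYSE:", ""), ("NYSEARCA:", ""), ("OTCMKTS:", ""), ("NSE:", ".NS"), ("BSE:", ".BO")] : PySem.Dict String String).items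
        = [("NASDAQ:", ""), ("NYSE:", ""), ("NYSEARCA:", ""), ("OTCMKTS:", ""), ("NSE:", ".NS"), ("BSE:", ".BO")] := by decide
    rw [hitems, hdict]
    by_cases hneg : PySem.Str.find t ":" = -1
    · have hb : (PySem.Str.find t ":" == -1) = true := by rw [hneg]; rfl
      rw [loopA_no_colon t (by rw [← hfind]; exact hneg) _ (by decide), hb, if_pos rfl]
    · have h0 : 0 ≤ PySem.Str.find t ":" := by
        have := PySem.Chars.neg_one_le_find t.toList [':']
        rw [← hfind] at this
        omega
      have hb : (PySem.Str.find t ":" == -1) = false := beq_eq_false_iff_ne.mpr hneg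
      rw [hb, if_neg Bool.false_ne_true]
      have hps' : ∀ pr ∈ ([("NASDAQ:", ""), ("NYSE:", ""), ("NYSEARCA:", ""), ("OTCMKTS:", ""),
          ("NSE:", ".NS"), ("BSE:", ".BO")] : List (String × String)),
          ∃ q, pr.1.toList = q ++ [':'] ∧ (':' : Char) ∉ q := by
        intro pr hpr
        simp only [List.mem_cons, List.not_mem_nil, or_false] at hpr
        rcases hpr with rfl | rfl | rfl | rfl | rfl | rfl
        · exact ⟨['N','A','S','D','A','Q'], by decide, by decide⟩
        · exact ⟨['N','Y','S','E'], by decide, by decide⟩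
        · exact ⟨['N','Y','S','E','A','R','C','A'], by decide, by decide⟩
        · exact ⟨['O','T','C','M','K','T','S'], by decide, by decide⟩
        · exact ⟨['N','S','E'], by decide, by decide⟩
        · exact ⟨['B','S','E'], by decide, by decide⟩
      rw [loopA_eq_lookup t (PySem.Str.find t ":") (by rw [hfind]) h0 _ hps']
      cases hS : (PySem.Dict.mk ([("NASDAQ:", ""), ("NYSE:", ""), ("NYSEARCA:", ""), ("OTCMKTS:", ""),
          ("NSE:", ".NS"), ("BSE:", ".BO")] : List (String × String))).get?
          (PySem.Str.slice t none (some (PySem.Str.find t ":" + 1))) with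
      | none => rfl
      | some suf => rfl
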